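-- pv_equiv track=rewrite | github.com/eblancof/py-fifo-tracker | src/parsers/common.py | resolve_transaction_side
-- ===== SOURCE A (Python) =====
-- from unicodedata import normalize
--
-- def normalize_text(value: str) -> str:
--     normalized = normalize("NFKD", value or "")
--     ascii_only = "".join(char for char in normalized if ord(char) < 128)
--     return " ".join(ascii_only.strip().lower().split())
--
-- def resolve_transaction_side(
--     raw_type: str,
--     transaction_type_aliases: dict[str, list[str]],
-- ) -> str | None:
--     normalized = normalize_text(raw_type)
--     for side, aliases in transaction_type_aliases.items():
--         if normalized in {normalize_text(alias) for alias in aliases}: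
--             return side
--     return None
-- ===== SOURCE B (Python) =====
-- from unicodedata import normalize
--
--
-- def normalize_text(value: str) -> str:
--     normalized = normalize("NFKD", value or "")
--     ascii_only = "".join(char for char in normalized if ord(char) < 128)
--     return " ".join(ascii_only.strip().lower().split())
--
--
-- def resolve_transaction_side(raw_type, transaction_type_aliases):
--     # Build an inverted index normalized-alias -> side once (first side wins),
--     # then answer with a single lookup.
--     index = {}
--     for side, aliases in transaction_type_aliases.items():
--         for alias in aliases:
--             index.setdefault(normalize_text(alias), side)
--     return index.get(normalize_text(raw_type))
-- ===== Notes on version B (the rewrite author's own statement) =====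
-- stated objective: alternative
-- what changed: Replaces the per-side loop that builds a set of normalized aliases and tests membership with an inverted index built once via setdefault (first side wins) followed by a single dict lookup.
import Mathlib
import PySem

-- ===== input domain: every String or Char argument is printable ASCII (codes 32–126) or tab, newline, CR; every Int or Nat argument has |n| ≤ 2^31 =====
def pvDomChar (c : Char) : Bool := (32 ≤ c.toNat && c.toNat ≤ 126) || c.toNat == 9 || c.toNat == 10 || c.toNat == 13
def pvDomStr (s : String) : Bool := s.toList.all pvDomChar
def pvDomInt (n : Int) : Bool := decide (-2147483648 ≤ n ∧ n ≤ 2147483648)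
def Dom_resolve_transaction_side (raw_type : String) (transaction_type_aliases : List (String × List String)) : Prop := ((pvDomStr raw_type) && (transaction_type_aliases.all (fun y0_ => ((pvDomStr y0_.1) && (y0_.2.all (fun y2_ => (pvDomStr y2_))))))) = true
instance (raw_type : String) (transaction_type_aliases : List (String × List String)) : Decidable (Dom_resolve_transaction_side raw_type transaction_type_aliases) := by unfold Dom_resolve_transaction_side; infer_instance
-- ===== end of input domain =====

-- ===== PORT A =====
-- Header: B builds an inverted alias->side index once (setdefault, first side wins) and does one lookup -- alternative structure, same results.
-- normalize_text: on the printable-ASCII domain NFKD is the identity and the ord<128 filter keeps every char,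
-- so the port is " ".join(value.strip().lower().split()) -- exact on Dom.
def pvNormText (v : String) : String :=
  PySem.Str.join " " (PySem.Str.split₀ (PySem.Str.lower (PySem.Str.strip v)))

def pvFindSide (n : String) : List (String × List String) → Option String
  | [] => none
  | (side, aliases) :: rest =>
      if PySem.Set.contains (PySem.Set.ofList (aliases.map pvNormText)) n then some side
      else pvFindSide n rest

def resolve_transaction_side (raw_type : String) (transaction_type_aliases : List (String × List String)) : Option String :=
  pvFindSide (pvNormText raw_type) transaction_type_aliases

-- ===== PORT B =====
def resolve_transaction_side_alt (raw_type : String) (transaction_type_aliases : List (String × List String)) : Option String :=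
  let index : PySem.Dict String String :=
    transaction_type_aliases.foldl
      (fun d p => p.2.foldl (fun d a => PySem.Dict.setdefault d (pvNormText a) p.1) d)
      PySem.Dict.empty
  PySem.Dict.get? index (pvNormText raw_type)

-- ===== PRECONDITION & SPEC =====
def Spec_resolve_transaction_side (raw_type : String) (transaction_type_aliases : List (String × List String)) (out : Option String) : Prop := out = resolve_transaction_side_alt raw_type transaction_type_aliases
instance (raw_type : String) (transaction_type_aliases : List (String × List String)) (out : Option String) : Decidable (Spec_resolve_transaction_side raw_type transaction_type_aliases out) := by unfold Spec_resolve_transaction_side; infer_instance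

-- ===== CLAIM (what is proved, stated in full; the proofs are below) =====
def Claim_equal_resolve_transaction_side : Prop := ∀ (raw_type : String) (transaction_type_aliases : List (String × List String)), Dom_resolve_transaction_side raw_type transaction_type_aliases → Spec_resolve_transaction_side raw_type transaction_type_aliases (resolve_transaction_side raw_type transaction_type_aliases)

-- ===== LEMMAS AND PROOFS =====
theorem get?_setdefault_fold (aliases : List String) (side n : String) (d : PySem.Dict String String) :
    PySem.Dict.get? (aliases.foldl (fun d a => PySem.Dict.setdefault d (pvNormText a) side) d) n
      = (PySem.Dict.get? d n).or (if n ∈ aliases.map pvNormText then some side else none) := by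
  induction aliases generalizing d with
  | nil => simp
  | cons a t ih =>
    simp only [List.foldl_cons, ih, List.map_cons, List.mem_cons]
    by_cases h : n = pvNormText a
    · rw [h, PySem.Dict.get?_setdefault_self]
      cases hd : PySem.Dict.get? d (pvNormText a) <;> simp
    · rw [PySem.Dict.get?_setdefault_of_ne _ _ h]
      simp [h]

theorem build_get? (l : List (String × List String)) (n : String) (d : PySem.Dict String String) :
    PySem.Dict.get?
        (l.foldl (fun d p => p.2.foldl (fun d a => PySem.Dict.setdefault d (pvNormText a) p.1) d) d) n
      = (PySem.Dict.get? d n).or (pvFindSide n l) := by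
  induction l generalizing d with
  | nil => simp [pvFindSide]
  | cons p rest ih =>
    simp only [List.foldl_cons, ih, get?_setdefault_fold, pvFindSide, Option.or_assoc]
    by_cases h : n ∈ p.2.map pvNormText
    · have hc : PySem.Set.contains (PySem.Set.ofList (p.2.map pvNormText)) n = true := by
        rw [PySem.Set.contains_iff, PySem.Set.mem_ofList]; exact h
      rw [hc]
      simp only [if_pos h]
      cases hd : PySem.Dict.get? d n <;> simp
    · have hc : PySem.Set.contains (PySem.Set.ofList (p.2.map pvNormText)) n = false := by
        rw [Bool.eq_false_iff]
        intro hcon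
        exact h ((PySem.Set.mem_ofList _ _).mp ((PySem.Set.contains_iff _ _).mp hcon))
      rw [hc]
      simp [h]

-- ===== VERDICT (by name: the statement is the Claim_ definition above) =====
theorem resolve_transaction_side_spec : Claim_equal_resolve_transaction_side := by
  intro raw_type l _
  show _ = _
  unfold resolve_transaction_side resolve_transaction_side_alt
  rw [build_get?]
  simp [PySem.Dict.empty, PySem.Dict.get?]
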